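-- pv_equiv track=rewrite | github.com/nickmflorin/git-blame-project | git_blame_project/utils/strings.py | get_string_formatted_kwargs
-- ===== SOURCE A (Python) =====
-- def get_string_formatted_kwargs(value):
--     """
--     Returns the string arguments that are used to format the string.
--
--     Example:
--     --------
--     In the string foo = "Hello {world}", the string foo would be formatted as
--     foo.format(world='bar').  In this case, this method will return ["world"],
--     indicating that `world` is the only argument needed to format the string.
--     """
--     formatted_kwargs = []
--     current_formatted_kwarg = None
--     for char in value:
--         if char == "{":
--             current_formatted_kwarg = ""
--         elif char == "}":
--             if current_formatted_kwarg is not None: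
--                 if current_formatted_kwarg not in formatted_kwargs:
--                     formatted_kwargs.append(current_formatted_kwarg)
--                 current_formatted_kwarg = None
--         else:
--             if current_formatted_kwarg is not None:
--                 current_formatted_kwarg = current_formatted_kwarg + char
--     return formatted_kwargs
-- ===== SOURCE B (Python) =====
-- def get_string_formatted_kwargs(value):
--     found = []
--     for part in value.split('{')[1:]:
--         i = part.find('}')
--         if i != -1:
--             found.append(part[:i])
--     return list(dict.fromkeys(found))
-- ===== Notes on version B (the rewrite author's own statement) =====
-- stated objective: idiomatic
-- what changed: Replaced the character-by-character FSM (state reset on each opening brace) by splitting the string on the opening brace, cutting each part at its first closing brace, and deduplicating once at the end with dict.fromkeys instead of an in-loop membership test.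
import Mathlib
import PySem

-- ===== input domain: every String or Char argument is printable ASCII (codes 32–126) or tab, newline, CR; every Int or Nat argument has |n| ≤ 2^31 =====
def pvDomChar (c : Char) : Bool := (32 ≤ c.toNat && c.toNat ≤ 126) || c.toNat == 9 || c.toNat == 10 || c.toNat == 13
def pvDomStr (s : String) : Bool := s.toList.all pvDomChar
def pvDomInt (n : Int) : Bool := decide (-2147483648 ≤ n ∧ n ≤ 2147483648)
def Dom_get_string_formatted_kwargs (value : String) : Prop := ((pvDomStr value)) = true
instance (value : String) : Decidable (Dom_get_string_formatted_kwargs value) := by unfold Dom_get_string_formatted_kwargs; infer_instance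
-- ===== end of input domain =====

-- B replaces A's char-by-char FSM by split-on-'{' / cut-at-first-'}' / one final dedup (idiomatic; a timing run measured B faster).

-- ===== PORT A =====
-- the for-loop over the characters, state = (current_formatted_kwarg : Option, formatted_kwargs)
def aGo : List Char → Option (List Char) → List (List Char) → List (List Char)
  | [], _, acc => acc
  | c :: cs, cur, acc =>
    if c = '{' then aGo cs (some []) acc
    else if c = '}' then
      match cur with
      | some s => aGo cs none (if acc.contains s then acc else acc ++ [s])
      | none => aGo cs none acc
    else aGo cs (cur.map (· ++ [c])) acc

def get_string_formatted_kwargs (value : String) : List String :=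
  (aGo value.toList none []).map String.ofList

-- ===== PORT B =====
-- for part in value.split('{')[1:]: i = part.find('}'); if i != -1: found.append(part[:i])
def bGo (parts : List (List Char)) : List (List Char) :=
  parts.foldl (fun found part =>
    let i := PySem.Chars.find part ['}']
    if i ≠ -1 then found ++ [PySem.List.slice part none (some i)] else found) []

def get_string_formatted_kwargs_alt (value : String) : List String :=
  (PySem.List.dedup (bGo ((PySem.Chars.splitOn value.toList ['{']).drop 1))).map String.ofList

-- ===== PRECONDITION & SPEC =====
def Spec_get_string_formatted_kwargs (value : String) (out : List String) : Prop := out = get_string_formatted_kwargs_alt value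
instance (value : String) (out : List String) : Decidable (Spec_get_string_formatted_kwargs value out) := by unfold Spec_get_string_formatted_kwargs; infer_instance

-- ===== CLAIM (what is proved, stated in full; the proofs are below) =====
def Claim_equal_get_string_formatted_kwargs : Prop := ∀ (value : String), Dom_get_string_formatted_kwargs value → Spec_get_string_formatted_kwargs value (get_string_formatted_kwargs value)

-- ===== LEMMAS AND PROOFS =====

-- A's FSM without the in-loop dedup: the raw sequence of emitted segments
def raw : List Char → Option (List Char) → List (List Char)
  | [], _ => []
  | c :: cs, cur =>
    if c = '{' then raw cs (some [])
    else if c = '}' then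
      match cur with
      | some s => s :: raw cs none
      | none => raw cs none
    else raw cs (cur.map (· ++ [c]))

-- the natural structural split on '{' (shown equal to PySem.Chars.splitOn)
def mySplit : List Char → List Char → List (List Char)
  | pre, [] => [pre]
  | pre, c :: cs => if c = '{' then pre :: mySplit [] cs else mySplit (pre ++ [c]) cs

-- what B keeps of one part
def cut (p : List Char) : Option (List Char) :=
  if '}' ∈ p then some (p.takeWhile (· ≠ '}')) else none

lemma aGo_eq_foldl (cs : List Char) : ∀ cur acc,
    aGo cs cur acc = List.foldl PySem.Set.add acc (raw cs cur) := by
  induction cs with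
  | nil => intro cur acc; simp [aGo, raw]
  | cons c cs ih =>
    intro cur acc
    by_cases h1 : c = '{'
    · simp [aGo, raw, h1, ih]
    · by_cases h2 : c = '}'
      · cases cur with
        | none => simp [aGo, raw, h2, ih]
        | some s => simp [aGo, raw, h2, ih, PySem.Set.add]
      · simp [aGo, raw, h1, h2, ih]

lemma splitOn_go_spec (fuel : Nat) : ∀ (l cur : List Char) (acc : List (List Char)),
    l.length < fuel →
    PySem.Chars.splitOn.go ['{'] fuel l cur acc = acc.reverse ++ mySplit cur.reverse l := by
  induction fuel with
  | zero => intro l cur acc h; omega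
  | succ fuel ih =>
    intro l cur acc h
    cases l with
    | nil => simp [PySem.Chars.splitOn.go, mySplit]
    | cons c rest =>
      by_cases h1 : c = '{'
      · have hpre : List.isPrefixOf ['{'] (c :: rest) = true := by
          simp [List.isPrefixOf, h1]
        rw [PySem.Chars.splitOn.go]
        simp only [hpre, if_true]
        rw [ih]
        · simp [mySplit, h1]
        · simp at h ⊢; omega
      · have hpre : List.isPrefixOf ['{'] (c :: rest) = false := by
          simp [List.isPrefixOf]; intro hc; exact h1 hc.symm
        rw [PySem.Chars.splitOn.go]
        simp only [hpre, Bool.false_eq_true, if_false]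
        rw [ih]
        · simp [mySplit, h1]
        · simp at h ⊢; omega

lemma splitOn_eq_mySplit (l : List Char) :
    PySem.Chars.splitOn l ['{'] = mySplit [] l := by
  have := splitOn_go_spec (l.length + 1) l [] [] (by omega)
  simpa [PySem.Chars.splitOn] using this

-- mySplit's head always extends pre
lemma mySplit_head (l : List Char) : ∀ pre, ∃ u t, mySplit pre l = (pre ++ u) :: t := by
  induction l with
  | nil => intro pre; exact ⟨[], [], by simp [mySplit]⟩
  | cons c cs ih =>
    intro pre
    by_cases h1 : c = '{'
    · exact ⟨[], mySplit [] cs, by simp [mySplit, h1]⟩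
    · obtain ⟨u, t, hu⟩ := ih (pre ++ [c])
      exact ⟨c :: u, t, by simp [mySplit, h1, hu]⟩

-- collect = B's per-part filter over all parts
def collectAll (ps : List (List Char)) : List (List Char) := ps.flatMap (fun p => (cut p).toList)

lemma raw_collect (l : List Char) :
    (∀ s, '}' ∉ s → raw l (some s) = collectAll (mySplit s l)) ∧
    (∀ pre, raw l none = collectAll ((mySplit pre l).drop 1)) := by
  induction l with
  | nil =>
    constructor
    · intro s hs; simp [raw, mySplit, collectAll, cut, hs]
    · intro pre; simp [raw, mySplit, collectAll]
  | cons c cs ih =>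
    constructor
    · intro s hs
      by_cases h1 : c = '{'
      · have h2 : raw cs (some []) = collectAll (mySplit [] cs) := ih.1 [] (by simp)
        simp [raw, mySplit, h1, collectAll, cut, hs, h2]
      · by_cases h2 : c = '}'
        · -- emit s, continue with none; the part becomes (s ++ '}' ++ …)
          subst h2
          obtain ⟨u, t, hu⟩ := mySplit_head cs (s ++ ['}'])
          have htail : raw cs none = collectAll t := by
            have h := ih.2 (s ++ ['}']); rw [hu] at h; simpa [collectAll] using h
          have hmem : '}' ∈ s ++ ['}'] ++ u := by simp
          have htw : List.takeWhile (fun x => !decide (x = '}')) (s ++ '}' :: u) = s := by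
            clear hu htail hmem ih
            induction s with
            | nil => simp
            | cons a as iha =>
              simp only [List.mem_cons, not_or] at hs
              have ha : ¬ a = '}' := fun h => hs.1 h.symm
              simp only [List.cons_append, List.takeWhile_cons, ha, decide_false,
                Bool.not_false, if_true]
              rw [iha hs.2]
          simp only [raw, h1, if_false]
          rw [show mySplit s ('}' :: cs) = (s ++ ['}'] ++ u) :: t from by
            simpa [mySplit, h1] using hu]
          have hmem' : '}' ∈ s ++ '}' :: u := by simp
          simp only [collectAll, cut, List.flatMap_cons, List.append_assoc,
            List.singleton_append, hmem', if_pos, Option.toList_some,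
            List.singleton_append]
          simp [htw, htail, collectAll, cut]
        · have hs' : '}' ∉ s ++ [c] := by
            simp [hs]; exact fun he => h2 he.symm
          simp [raw, h1, h2, mySplit, ih.1 _ hs']
    · intro pre
      by_cases h1 : c = '{'
      · simp [raw, mySplit, h1, ih.1 [] (by simp)]
      · by_cases h2 : c = '}'
        · simp [raw, h2, mySplit, ih.2 (pre ++ [c])]
        · simp [raw, h1, h2, mySplit, ih.2 (pre ++ [c])]


-- B's fold over a part list computes collectAll
lemma take_find_eq_takeWhile (p : List Char) (h : PySem.Chars.find p ['}'] ≠ -1) :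
    List.take (PySem.Chars.find p ['}']).toNat p = p.takeWhile (· ≠ '}') := by
  have hnn : 0 ≤ PySem.Chars.find p ['}'] := by
    have h1 := PySem.Chars.neg_one_le_find p ['}']
    omega
  obtain ⟨hpref, hmin⟩ := PySem.Chars.find_spec hnn
  set i := (PySem.Chars.find p ['}']).toNat with hi
  have hgetI : p.drop i ≠ [] ∧ (p.drop i).head? = some '}' := by
    rcases hpref with ⟨t, ht⟩
    constructor
    · intro hcon; rw [hcon] at ht; simp at ht
    · rw [← ht]; rfl
  have hilt : i < p.length := by
    by_contra hc
    have hle : p.length ≤ i := by omega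
    have : p.drop i = [] := List.drop_eq_nil_of_le hle
    exact hgetI.1 this
  have hgoal : ∀ (q : List Char) (j : Nat), j < q.length → (q.drop j).head? = some '}' →
      (∀ k, k < j → ¬ ['}'] <+: q.drop k) → q.take j = q.takeWhile (· ≠ '}') := by
    intro q
    induction q with
    | nil => intro j hj; simp at hj
    | cons x xs ihq =>
      intro j hj hhead hk
      cases j with
      | zero =>
        simp at hhead
        simp [List.takeWhile, hhead]
      | succ j =>
        have hx : x ≠ '}' := by
          intro hx
          exact hk 0 (by omega) (by simp [hx])
        have := ihq j (by simpa using hj) (by simpa using hhead)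
          (fun k hk' => by
            have := hk (k + 1) (by omega)
            simpa using this)
        simp [List.takeWhile, hx, this]
  exact hgoal p i hilt hgetI.2 (fun k hk => hmin k hk)

lemma bGo_eq_collectAll (ps : List (List Char)) : bGo ps = collectAll ps := by
  unfold bGo
  rw [show (fun (found : List (List Char)) part =>
      let i := PySem.Chars.find part ['}']
      if i ≠ -1 then found ++ [PySem.List.slice part none (some i)] else found)
      = (fun found part => found ++ (cut part).toList) from ?_]
  · rw [PySem.List.foldl_append_eq_flatMap]; rfl
  · funext found p
    by_cases h : PySem.Chars.find p ['}'] = -1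
    · have hmem : '}' ∉ p := by
        have hni := (PySem.Chars.find_eq_neg_one_iff p ['}']).mp h
        intro hc
        obtain ⟨s1, s2, rfl⟩ := List.append_of_mem hc
        exact hni ⟨s1, s2, by simp⟩
      simp [h, cut, hmem]
    · have hnn : 0 ≤ PySem.Chars.find p ['}'] := by
        have := PySem.Chars.neg_one_le_find p ['}']; omega
      have hmem : '}' ∈ p := by
        have hinf := (PySem.Chars.find_nonneg_iff p ['}']).mp hnn
        rcases hinf with ⟨s1, s2, rfl⟩
        simp
      simp only [h, ne_eq, not_false_iff, if_true]
      rw [PySem.List.slice_to p hnn, take_find_eq_takeWhile p h]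
      simp [cut, hmem]

-- ===== VERDICT (by name: the statement is the Claim_ definition above) =====
theorem get_string_formatted_kwargs_spec : Claim_equal_get_string_formatted_kwargs := by
  intro value _
  unfold Spec_get_string_formatted_kwargs get_string_formatted_kwargs get_string_formatted_kwargs_alt
  rw [aGo_eq_foldl, bGo_eq_collectAll, splitOn_eq_mySplit, (raw_collect value.toList).2 [],
    PySem.List.dedup_eq_ofList, PySem.Set.ofList]
  rfl
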